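-- pv_equiv track=rewrite | github.com/HimanshuLadva/Python-DSA | Leetcode/daily/202511/20251110.py | minOperations
-- ===== SOURCE A (Python) =====
-- from typing import List
--
-- def minOperations(nums: List[int]) -> int:
--     count = 0
--     while any(x != 0 for x in nums):
--         elements = []
--         indexs = []
--         for i,x in enumerate(nums):
--             if x == 0:
--                 if elements:
--                     min_element = min(elements)
--                     temp = False
--                     for j in range(len(elements)):
--                         if elements[j] == min_element:
--                             nums[indexs[j]] = 0
--                             temp = True
--
--                     if temp:
--                         count += 1
--
--                 elements = []
--                 indexs = []
--             else:
--                 elements.append(x)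
--                 indexs.append(i)
--
--         if elements:
--             min_element = min(elements)
--             temp = False
--             for j in range(len(elements)):
--                 if elements[j] == min_element:
--                     nums[indexs[j]] = 0
--                     temp = True
--             if temp:
--                 count += 1
--     return count
--
-- nums = [3,1,2,1]
-- ===== SOURCE B (Python) =====
-- from typing import List
--
-- def minOperations(nums: List[int]) -> int:
--     # One pass with a monotonic stack: within each zero-delimited segment,
--     # count the values that start a new "level" (stack push); each such value
--     # costs exactly one zeroing operation.
--     stack = []
--     res = 0
--     for x in nums:
--         if x == 0:
--             stack = []
--         else:
--             while stack and stack[-1] > x: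
--                 stack.pop()
--             if not stack or stack[-1] != x:
--                 stack.append(x)
--                 res += 1
--     return res
-- ===== Notes on version B (the rewrite author's own statement) =====
-- stated objective: faster
-- what changed: Replaced the repeated full-array simulation (zero each segment's minima round after round) by a single left-to-right pass with a monotonic stack that counts one operation per stack push within each zero-delimited segment.
import Mathlib
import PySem

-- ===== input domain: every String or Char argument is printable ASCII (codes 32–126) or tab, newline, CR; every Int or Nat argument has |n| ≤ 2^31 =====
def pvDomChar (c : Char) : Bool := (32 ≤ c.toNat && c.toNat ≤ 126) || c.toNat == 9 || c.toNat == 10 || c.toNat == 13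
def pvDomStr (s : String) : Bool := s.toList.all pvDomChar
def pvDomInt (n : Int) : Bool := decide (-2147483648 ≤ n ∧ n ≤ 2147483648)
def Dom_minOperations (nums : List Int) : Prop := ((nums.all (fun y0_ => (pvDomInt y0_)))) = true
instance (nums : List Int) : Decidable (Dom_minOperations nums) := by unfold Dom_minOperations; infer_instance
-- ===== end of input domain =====

-- B is a one-pass monotonic-stack count replacing A's round-by-round simulation (measured asymptotically
-- faster); A mutates its argument in place (zeroes it out) while B does not — the equivalence proved here
-- is about the return value only.

-- ===== PORT A =====
-- enumerate(nums): positions are the nonnegative list indices, so we carry them as Nat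
def enumFrom : Nat → List Int → List (Nat × Int)
  | _, [] => []
  | k, x :: xs => (k, x) :: enumFrom (k + 1) xs

-- `min_element = min(elements); for j ...: if elements[j] == min_element: nums[indexs[j]] = 0; temp = True`
-- (elements is nonempty at every call site, so `.getD 0` is never the raising case of Python's min)
def flushA (nums elements : List Int) (indexs : List Nat) : List Int × Bool :=
  let m := elements.min?.getD 0
  (elements.zip indexs).foldl
    (fun acc ei => if ei.1 = m then (acc.1.set ei.2 0, true) else acc) (nums, false)

-- the body of `for i, x in enumerate(nums)`; state = (nums, elements, indexs, count)
def stepA (s : List Int × List Int × List Nat × Int) (ix : Nat × Int) :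
    List Int × List Int × List Nat × Int :=
  let (nums, elements, indexs, count) := s
  if ix.2 = 0 then
    if elements ≠ [] then
      let ft := flushA nums elements indexs
      (ft.1, [], [], if ft.2 then count + 1 else count)
    else (nums, [], [], count)
  else (nums, elements ++ [ix.2], indexs ++ [ix.1], count)

-- the trailing `if elements:` flush after the for-loop
def finishA (r : List Int × List Int × List Nat × Int) : List Int × Int :=
  if r.2.1 ≠ [] then
    let ft := flushA r.1 r.2.1 r.2.2.1
    (ft.1, if ft.2 then r.2.2.2 + 1 else r.2.2.2)
  else (r.1, r.2.2.2)

-- one iteration of the while loop: the for-pass plus the trailing `if elements:` flush;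
-- returns the mutated nums and the number of count increments of this round
def onePassA (nums : List Int) : List Int × Int :=
  finishA ((enumFrom 0 nums).foldl stepA (nums, [], [], 0))

-- `while any(x != 0 for x in nums)`; the fuel is only a totality guard: each round strictly
-- decreases the number of nonzero entries (proved below), so `countP (· ≠ 0) + 1` rounds suffice
def goA : Nat → List Int → Int → Int
  | 0, _, count => count
  | fuel + 1, nums, count =>
    if nums.any (· ≠ 0) then
      let p := onePassA nums
      goA fuel p.1 (count + p.2)
    else count

def minOperations (nums : List Int) : Int :=
  goA (nums.countP (· ≠ 0) + 1) nums 0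

-- ===== PORT B =====
-- `while stack and stack[-1] > x: stack.pop()`  (stack top = list head)
def popGT : List Int → Int → List Int
  | [], _ => []
  | t :: r, x => if t > x then popGT r x else t :: r

-- loop body of B; state = (stack, res)
def stepB (s : List Int × Int) (x : Int) : List Int × Int :=
  if x = 0 then ([], s.2)
  else
    let st := popGT s.1 x
    if st.head? = some x then (st, s.2) else (x :: st, s.2 + 1)

def minOperations_alt (nums : List Int) : Int :=
  (nums.foldl stepB ([], 0)).2

-- ===== PRECONDITION & SPEC =====
def Spec_minOperations (nums : List Int) (out : Int) : Prop := out = minOperations_alt nums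
instance (nums : List Int) (out : Int) : Decidable (Spec_minOperations nums out) := by unfold Spec_minOperations; infer_instance

-- ===== CLAIM (what is proved, stated in full; the proofs are below) =====
def Claim_equal_minOperations : Prop := ∀ (nums : List Int), Dom_minOperations nums → Spec_minOperations nums (minOperations nums)

-- ===== LEMMAS AND PROOFS =====

-- zeroing the occurrences of m, pointwise
def map0 (m : Int) (a : List Int) : List Int := a.map (fun x => if x = m then 0 else x)

def nz (l : List Int) : Nat := l.countP (· ≠ 0)

-- ---- facts about min ----
theorem min_facts {a : List Int} (h : a ≠ []) :
    a.min?.getD 0 ∈ a ∧ ∀ x ∈ a, a.min?.getD 0 ≤ x := by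
  constructor
  · exact List.min?_mem (by cases a with | nil => simp at h | cons x t => simp [List.min?_cons])
  · intro x hx
    cases hm : a.min? with
    | none => simp [List.min?_eq_none_iff] at hm; simp [hm] at hx
    | some m =>
      rw [List.min?_eq_some_iff] at hm
      simp only [Option.getD_some]
      exact hm.2 x hx

-- ---- B-side: res offset ----
theorem stepB_res (s : List Int × Int) (x : Int) :
    stepB s x = ((stepB (s.1, 0) x).1, s.2 + (stepB (s.1, 0) x).2) := by
  cases s with | mk st r =>
  simp only [stepB]
  split_ifs <;> simp <;> split <;> simp

theorem foldB_res (xs : List Int) (st : List Int) (r : Int) :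
    xs.foldl stepB (st, r) = ((xs.foldl stepB (st, 0)).1, r + (xs.foldl stepB (st, 0)).2) := by
  induction xs generalizing st r with
  | nil => simp
  | cons x t ih =>
    simp only [List.foldl_cons]
    rw [stepB_res (st, r) x, ih, ih (stepB (st,0) x).1 (stepB (st,0) x).2]
    refine Prod.ext rfl ?_
    simp only
    ring

-- ---- B-side: zeros contribute nothing ----
theorem foldB_zeros (xs : List Int) (st : List Int) (r : Int) (h : ∀ x ∈ xs, x = 0) :
    (xs.foldl stepB (st, r)).2 = r := by
  induction xs generalizing st r with
  | nil => rfl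
  | cons x t ih =>
    have hx := h x (by simp)
    subst hx
    simp only [List.foldl_cons, stepB, if_pos rfl]
    exact ih _ _ (fun y hy => h y (by simp [hy]))

-- ---- B-side: split at a zero ----
theorem foldB_split (a b : List Int) (st : List Int) (r : Int) :
    ((a ++ 0 :: b).foldl stepB (st, r)).2 = (a.foldl stepB (st, r)).2 + minOperations_alt b := by
  rw [show a ++ 0 :: b = (a ++ [0]) ++ b from by simp, List.foldl_append, List.foldl_append]
  have : (a.foldl stepB (st, r)) = ((a.foldl stepB (st, r)).1, (a.foldl stepB (st, r)).2) := rfl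
  rw [this]
  simp only [List.foldl_cons, List.foldl_nil, stepB, if_pos rfl]
  rw [foldB_res]
  rfl

-- ---- popGT facts ----
theorem popGT_append_base (st : List Int) (x m : Int) (h : m ≤ x) :
    popGT (st ++ [m]) x = popGT st x ++ [m] := by
  induction st with
  | nil => simp [popGT]; omega
  | cons t r ih => simp only [popGT, List.cons_append]; split <;> simp [ih]

theorem popGT_all_gt (st : List Int) (m : Int) (h : ∀ y ∈ st, m < y) :
    popGT st m = [] := by
  induction st with
  | nil => rfl
  | cons t r ih =>
    have := h t (by simp)
    simp only [popGT, if_pos (by omega : t > m)]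
    exact ih (fun y hy => h y (by simp [hy]))

theorem popGT_subset (st : List Int) (x : Int) : ∀ y ∈ popGT st x, y ∈ st := by
  induction st with
  | nil => simp [popGT]
  | cons t r ih =>
    intro y hy
    simp only [popGT] at hy
    split at hy
    · exact List.mem_cons_of_mem _ (ih y hy)
    · exact hy

-- ---- B-side: a segment after its min was zeroed, stack sitting on base m ----
theorem foldB_after (m : Int) (xs : List Int) (st : List Int) (r : Int)
    (hxs : ∀ x ∈ xs, m ≤ x ∧ x ≠ 0) (hst : ∀ y ∈ st, m < y) :
    xs.foldl stepB (st ++ [m], r + 1) =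
      (((map0 m xs).foldl stepB (st, r)).1 ++ [m], ((map0 m xs).foldl stepB (st, r)).2 + 1) := by
  induction xs generalizing st r with
  | nil => simp [map0]
  | cons x t ih =>
    obtain ⟨hmx, hx0⟩ := hxs x (by simp)
    have hxs' : ∀ y ∈ t, m ≤ y ∧ y ≠ 0 := fun y hy => hxs y (by simp [hy])
    by_cases hxm : x = m
    · subst hxm
      simp only [map0, List.map_cons, List.foldl_cons]
      simp only [if_true]
      rw [show stepB (st ++ [x], r + 1) x =
            ([] ++ [x], r + 1) from by
          simp [stepB, hx0, popGT_append_base st x x le_rfl,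
            popGT_all_gt st x hst]]
      rw [show stepB (st, r) 0 = ([], r) from by simp [stepB]]
      have := ih [] r hxs' (by simp)
      simpa [map0] using this
    · have hmx' : m < x := lt_of_le_of_ne hmx (fun h => hxm h.symm)
      simp only [map0, List.map_cons, if_neg hxm, List.foldl_cons]
      have hpop := popGT_append_base st x m (le_of_lt hmx')
      cases hp : popGT st x with
      | nil =>
        rw [show stepB (st ++ [m], r + 1) x = ([x] ++ [m], (r + 1) + 1) from by
            simp [stepB, hx0, hpop, hp]; intro h; exact absurd h.symm hxm]
        rw [show stepB (st, r) x = ([x], r + 1) from by simp [stepB, hx0, hp]]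
        have := ih [x] (r + 1) hxs' (by simpa using hmx')
        simpa [map0] using this
      | cons u us =>
        by_cases hux : u = x
        · rw [show stepB (st ++ [m], r + 1) x = ((u :: us) ++ [m], r + 1) from by
              simp [stepB, hx0, hpop, hp, hux]]
          rw [show stepB (st, r) x = (u :: us, r) from by simp [stepB, hx0, hp, hux]]
          have hsub : ∀ y ∈ u :: us, m < y := fun y hy =>
            hst y (popGT_subset st x y (hp ▸ hy))
          exact ih (u :: us) r hxs' hsub
        · rw [show stepB (st ++ [m], r + 1) x = ((x :: u :: us) ++ [m], (r + 1) + 1) from by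
              simp [stepB, hx0, hpop, hp, hux]]
          rw [show stepB (st, r) x = (x :: u :: us, r + 1) from by simp [stepB, hx0, hp, hux]]
          have hsub : ∀ y ∈ x :: u :: us, m < y := by
            intro y hy
            rcases List.mem_cons.1 hy with h | h
            · omega
            · exact hst y (popGT_subset st x y (hp ▸ h))
          exact ih (x :: u :: us) (r + 1) hxs' hsub

theorem foldB_before (m : Int) (xs : List Int) (st : List Int) (r : Int)
    (hxs : ∀ x ∈ xs, m ≤ x ∧ x ≠ 0) (hst : ∀ y ∈ st, m < y) (hm : m ∈ xs) :
    (xs.foldl stepB (st, r)).2 = ((map0 m xs).foldl stepB (st, r)).2 + 1 := by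
  induction xs generalizing st r with
  | nil => simp at hm
  | cons x t ih =>
    obtain ⟨hmx, hx0⟩ := hxs x (by simp)
    have hxs' : ∀ y ∈ t, m ≤ y ∧ y ≠ 0 := fun y hy => hxs y (by simp [hy])
    by_cases hxm : x = m
    · subst hxm
      simp only [map0, List.map_cons, List.foldl_cons]
      simp only [if_true]
      rw [show stepB (st, r) x = ([] ++ [x], r + 1) from by
          simp [stepB, hx0, popGT_all_gt st x hst]]
      rw [show stepB (st, r) 0 = ([], r) from by simp [stepB]]
      rw [foldB_after x t [] r hxs' (by simp)]
      rfl
    · have hmx' : m < x := lt_of_le_of_ne hmx (fun h => hxm h.symm)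
      have hm' : m ∈ t := by
        rcases List.mem_cons.1 hm with h | h
        · exact absurd h.symm hxm
        · exact h
      simp only [map0, List.map_cons, if_neg hxm, List.foldl_cons]
      have hsub : ∀ y ∈ (stepB (st, r) x).1, m < y := by
        intro y hy
        simp only [stepB, if_neg hx0] at hy
        split at hy
        · exact hst y (popGT_subset st x y hy)
        · rcases List.mem_cons.1 hy with h | h
          · omega
          · exact hst y (popGT_subset st x y h)
      have : (stepB (st, r) x) = ((stepB (st, r) x).1, (stepB (st, r) x).2) := rfl
      rw [this, ih _ _ hxs' hsub hm']
      have h2 : stepB (st, r) 0 = stepB (st, r) 0 := rfl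
      congr 2

-- B on a nonempty zero-free segment: one op plus B of the min-zeroed segment
theorem B_seg (a : List Int) (ha : a ≠ []) (h0 : ∀ x ∈ a, x ≠ 0) :
    minOperations_alt a = 1 + minOperations_alt (map0 (a.min?.getD 0) a) := by
  obtain ⟨hmem, hle⟩ := min_facts ha
  unfold minOperations_alt
  rw [foldB_before (a.min?.getD 0) a [] 0
      (fun x hx => ⟨hle x hx, h0 x hx⟩) (by simp) hmem]
  ring

-- ---- A-side: list-surgery helpers ----
theorem set_shift (pre cur : List Int) (i : Nat) (v : Int) :
    (pre ++ cur).set (i + pre.length) v = pre ++ cur.set i v := by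
  induction pre generalizing v with
  | nil => simp
  | cons p ps ih =>
    simp only [List.cons_append, List.length_cons]
    rw [show i + (ps.length + 1) = (i + ps.length) + 1 from by omega]
    simp [List.set_cons_succ, ih]

theorem enumFrom_append (k : Nat) (a b : List Int) :
    enumFrom k (a ++ b) = enumFrom k a ++ enumFrom (k + a.length) b := by
  induction a generalizing k with
  | nil => simp [enumFrom]
  | cons x t ih => simp [enumFrom, ih, Nat.add_assoc, Nat.add_comm 1 t.length]

theorem enumFrom_shift (k : Nat) (b : List Int) :
    enumFrom k b = (enumFrom 0 b).map (fun p => (p.1 + k, p.2)) := by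
  have gen : ∀ (b : List Int) (j k : Nat),
      enumFrom (j + k) b = (enumFrom j b).map (fun p => (p.1 + k, p.2)) := by
    intro b
    induction b with
    | nil => intro j k; rfl
    | cons x t ih =>
      intro j k
      simp only [enumFrom, List.map_cons]
      rw [show j + k + 1 = (j + 1) + k from by omega, ih]
  simpa using gen b 0 k

-- the flush fold, on consecutive indices into the middle of pre ++ a ++ suf, zeroes the m-positions of a
theorem flush_fold (m : Int) (a : List Int) : ∀ (pre suf : List Int) (t : Bool),
    (a.zip (List.range' pre.length a.length)).foldl
        (fun acc ei => if ei.1 = m then (acc.1.set ei.2 0, true) else acc) (pre ++ a ++ suf, t)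
      = (pre ++ map0 m a ++ suf, t || a.any (· = m)) := by
  induction a with
  | nil => intro pre suf t; simp [map0]
  | cons x rest ih =>
    intro pre suf t
    simp only [List.length_cons, List.range'_succ, List.zip_cons_cons, List.foldl_cons]
    by_cases hxm : x = m
    · rw [if_pos hxm]
      have hset : (pre ++ (x :: rest) ++ suf).set pre.length 0 = pre ++ (0 :: rest) ++ suf := by
        have := set_shift pre ((x :: rest) ++ suf) 0 (0 : Int)
        simpa using this
      rw [hset]
      have hre : pre ++ (0 :: rest) ++ suf = (pre ++ [0]) ++ rest ++ suf := by simp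
      rw [hre, show pre.length + 1 = (pre ++ [0]).length from by simp, ih (pre ++ [0]) suf true]
      simp [map0, hxm]
    · rw [if_neg hxm]
      have hre : pre ++ (x :: rest) ++ suf = (pre ++ [x]) ++ rest ++ suf := by simp
      rw [hre, show pre.length + 1 = (pre ++ [x]).length from by simp, ih (pre ++ [x]) suf t]
      simp [map0, hxm]

-- flushA relocated by a prefix
theorem zipfold_shift (m : Int) (pre : List Int) (ps : List (Int × Nat)) :
    ∀ (cur : List Int) (t : Bool),
    (ps.map (Prod.map id (· + pre.length))).foldl
        (fun acc ei => if ei.1 = m then (acc.1.set ei.2 0, true) else acc) (pre ++ cur, t)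
      = (pre ++ (ps.foldl (fun acc ei => if ei.1 = m then (acc.1.set ei.2 0, true) else acc) (cur, t)).1,
         (ps.foldl (fun acc ei => if ei.1 = m then (acc.1.set ei.2 0, true) else acc) (cur, t)).2) := by
  induction ps with
  | nil => intro cur t; simp
  | cons p qs ih =>
    intro cur t
    simp only [List.map_cons, List.foldl_cons, Prod.map, id_eq]
    by_cases hp : p.1 = m
    · rw [if_pos hp, if_pos hp]
      rw [set_shift pre cur p.2 0]
      exact ih (cur.set p.2 0) true
    · rw [if_neg hp, if_neg hp]
      exact ih cur t

-- flushA relocated by a prefix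
theorem flushA_shift (pre cur es : List Int) (is : List Nat) :
    flushA (pre ++ cur) es (is.map (· + pre.length)) =
      (pre ++ (flushA cur es is).1, (flushA cur es is).2) := by
  unfold flushA
  simp only
  rw [List.zip_map_right]
  exact zipfold_shift (es.min?.getD 0) pre (es.zip is) cur false

-- ---- A-side: count offset in the pass fold ----
theorem foldA_count (l : List (Nat × Int)) (nums es : List Int) (is : List Nat) (c : Int) :
    l.foldl stepA (nums, es, is, c) =
      ((l.foldl stepA (nums, es, is, 0)).1, (l.foldl stepA (nums, es, is, 0)).2.1,
       (l.foldl stepA (nums, es, is, 0)).2.2.1, c + (l.foldl stepA (nums, es, is, 0)).2.2.2) := by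
  induction l generalizing nums es is c with
  | nil => simp
  | cons p t ih =>
    have hstep : ∀ (c : Int), stepA (nums, es, is, c) p =
        ((stepA (nums, es, is, 0) p).1, (stepA (nums, es, is, 0) p).2.1,
         (stepA (nums, es, is, 0) p).2.2.1, c + (stepA (nums, es, is, 0) p).2.2.2) := by
      intro c
      simp only [stepA]
      split_ifs <;> simp
    simp only [List.foldl_cons]
    rw [hstep c]
    generalize stepA (nums, es, is, 0) p = S
    obtain ⟨n1, e1, i1, d1⟩ := S
    simp only
    rw [ih n1 e1 i1 (c + d1), ih n1 e1 i1 d1]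
    simp only [Prod.mk.injEq, true_and, and_true]
    ring

-- ---- A-side: a zero-free run only accumulates ----
theorem foldA_zero_free (a : List Int) : ∀ (k : Nat) (nums es : List Int) (is : List Nat) (c : Int),
    (∀ x ∈ a, x ≠ 0) →
    (enumFrom k a).foldl stepA (nums, es, is, c) = (nums, es ++ a, is ++ List.range' k a.length, c) := by
  induction a with
  | nil => intro k nums es is c _; simp [enumFrom]
  | cons x t ih =>
    intro k nums es is c h
    have hx : x ≠ 0 := h x (by simp)
    simp only [enumFrom, List.foldl_cons]
    rw [show stepA (nums, es, is, c) (k, x) = (nums, es ++ [x], is ++ [k], c) from by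
        simp [stepA, hx]]
    rw [ih (k+1) nums (es ++ [x]) (is ++ [k]) c (fun y hy => h y (by simp [hy]))]
    simp [List.range'_succ]

-- ---- A-side: the pass fold relocated by a prefix ----
theorem foldA_shift (l : List (Nat × Int)) : ∀ (pre cur es : List Int) (is : List Nat) (c : Int),
    (l.map (fun p => (p.1 + pre.length, p.2))).foldl stepA (pre ++ cur, es, is.map (· + pre.length), c) =
      ((pre ++ (l.foldl stepA (cur, es, is, c)).1), (l.foldl stepA (cur, es, is, c)).2.1,
       (l.foldl stepA (cur, es, is, c)).2.2.1.map (· + pre.length), (l.foldl stepA (cur, es, is, c)).2.2.2) := by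
  induction l with
  | nil => intro pre cur es is c; simp
  | cons p t ih =>
    intro pre cur es is c
    simp only [List.map_cons, List.foldl_cons]
    by_cases hx : p.2 = 0
    · by_cases hes : es = []
      · subst hes
        rw [show stepA (pre ++ cur, [], is.map (· + pre.length), c) (p.1 + pre.length, p.2) =
              (pre ++ cur, [], [], c) from by simp [stepA, hx]]
        rw [show stepA (cur, [], is, c) p = (cur, [], [], c) from by simp [stepA, hx]]
        have := ih pre cur [] [] c
        simpa using this
      · rw [show stepA (pre ++ cur, es, is.map (· + pre.length), c) (p.1 + pre.length, p.2) =
              ((pre ++ (flushA cur es is).1), [], [],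
               if (flushA cur es is).2 then c + 1 else c) from by
            simp only [stepA, hx, flushA_shift]
            simp [hes]]
        rw [show stepA (cur, es, is, c) p = ((flushA cur es is).1, [], [],
              if (flushA cur es is).2 then c + 1 else c) from by simp [stepA, hx, hes]]
        have := ih pre (flushA cur es is).1 [] [] (if (flushA cur es is).2 then c + 1 else c)
        simpa using this
    · rw [show stepA (pre ++ cur, es, is.map (· + pre.length), c) (p.1 + pre.length, p.2) =
            (pre ++ cur, es ++ [p.2], (is ++ [p.1]).map (· + pre.length), c) from by
          simp [stepA, hx]]
      rw [show stepA (cur, es, is, c) p = (cur, es ++ [p.2], is ++ [p.1], c) from by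
          simp [stepA, hx]]
      exact ih pre cur (es ++ [p.2]) (is ++ [p.1]) c

-- ---- onePassA characterizations ----
theorem finishA_count (n es : List Int) (is : List Nat) (c : Int) :
    finishA (n, es, is, c) = ((finishA (n, es, is, 0)).1, c + (finishA (n, es, is, 0)).2) := by
  unfold finishA
  by_cases hes : es = []
  · simp [hes]
  · simp only [ne_eq, hes, not_false_eq_true, reduceIte]
    by_cases hft : (flushA n es is).2 <;> simp [hft] <;> ring

theorem finishA_shift (pre n es : List Int) (is : List Nat) (c : Int) :
    finishA (pre ++ n, es, is.map (· + pre.length), c) =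
      (pre ++ (finishA (n, es, is, c)).1, (finishA (n, es, is, c)).2) := by
  unfold finishA
  by_cases hes : es = []
  · simp [hes]
  · simp only [ne_eq, hes, not_false_eq_true, reduceIte]
    rw [flushA_shift pre n es is]

theorem onePassA_zero_free (a : List Int) (h0 : ∀ x ∈ a, x ≠ 0) :
    onePassA a = (map0 (a.min?.getD 0) a, if a = [] then 0 else 1) := by
  unfold onePassA
  rw [foldA_zero_free a 0 a [] [] 0 h0]
  cases a with
  | nil => simp [finishA, map0]
  | cons x t =>
    obtain ⟨hmem, _⟩ := min_facts (List.cons_ne_nil x t)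
    unfold finishA
    simp only [List.nil_append, ne_eq, reduceIte, if_neg (List.cons_ne_nil x t),
      not_false_eq_true]
    rw [show flushA (x :: t) (x :: t) (List.range' 0 (x :: t).length) =
          (map0 ((x :: t).min?.getD 0) (x :: t), true) from by
        unfold flushA
        have := flush_fold ((x :: t).min?.getD 0) (x :: t) [] [] false
        simp only [List.nil_append, List.append_nil, List.length_nil] at this
        rw [this]
        simp only [Prod.mk.injEq, true_and, Bool.false_or, List.any_eq_true]
        exact ⟨_, hmem, by simp⟩]
    simp

theorem onePassA_split (a b : List Int) (h0 : ∀ x ∈ a, x ≠ 0) :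
    onePassA (a ++ 0 :: b) =
      (map0 (a.min?.getD 0) a ++ 0 :: (onePassA b).1,
       (if a = [] then 0 else 1) + (onePassA b).2) := by
  unfold onePassA
  rw [enumFrom_append 0 a (0 :: b)]
  simp only [List.foldl_append]
  rw [foldA_zero_free a 0 (a ++ 0 :: b) [] [] 0 h0]
  simp only [enumFrom, List.foldl_cons, List.nil_append, Nat.zero_add]
  have hstep0 : stepA (a ++ 0 :: b, a, List.range' 0 a.length, 0) (a.length, 0) =
      (map0 (a.min?.getD 0) a ++ 0 :: b, [], [], if a = [] then 0 else (1:Int)) := by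
    cases a with
    | nil => simp [stepA, map0]
    | cons x t =>
      obtain ⟨hmem, _⟩ := min_facts (List.cons_ne_nil x t)
      simp only [stepA, if_pos rfl, ne_eq, reduceIte, if_neg (List.cons_ne_nil x t),
        not_false_eq_true]
      rw [show flushA ((x :: t) ++ 0 :: b) (x :: t) (List.range' 0 (x :: t).length) =
            (map0 ((x :: t).min?.getD 0) (x :: t) ++ 0 :: b, true) from by
          unfold flushA
          have := flush_fold ((x :: t).min?.getD 0) (x :: t) [] (0 :: b) false
          simp only [List.nil_append, List.length_nil] at this
          rw [this]
          simp only [Prod.mk.injEq, true_and, Bool.false_or, List.any_eq_true]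
          exact ⟨_, hmem, by simp⟩]
      simp
  rw [hstep0]
  rw [show map0 (a.min?.getD 0) a ++ 0 :: b = (map0 (a.min?.getD 0) a ++ [0]) ++ b from by simp]
  rw [show enumFrom (a.length + 1) b =
        (enumFrom 0 b).map (fun p => (p.1 + (map0 (a.min?.getD 0) a ++ [0]).length, p.2)) from by
      rw [enumFrom_shift (a.length + 1) b]; simp [map0]]
  rw [show (([] : List Nat)) = (([] : List Nat)).map (· + (map0 (a.min?.getD 0) a ++ [0]).length) from rfl]
  rw [foldA_shift (enumFrom 0 b) (map0 (a.min?.getD 0) a ++ [0]) b [] [] (if a = [] then 0 else (1:Int))]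
  simp only [List.map_nil]
  rw [foldA_count (enumFrom 0 b) b [] [] (if a = [] then 0 else (1:Int))]
  generalize (enumFrom 0 b).foldl stepA (b, [], [], 0) = F
  obtain ⟨n', es', is', c'⟩ := F
  simp only
  rw [finishA_shift, finishA_count n' es' is' ((if a = [] then 0 else (1:Int)) + c'),
    finishA_count n' es' is' c']
  simp only [Prod.mk.injEq]
  refine ⟨by simp, by ring⟩

-- ---- nonzero counting ----
theorem nz_map0 (m : Int) (a : List Int) :
    nz (map0 m a) ≤ nz a ∧ (m ∈ a → m ≠ 0 → nz (map0 m a) < nz a) := by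
  induction a with
  | nil => simp [map0, nz]
  | cons x t ih =>
    rcases ih with ⟨ih1, ih2⟩
    have h1 : nz (map0 m (x :: t)) = nz (map0 m t) + (if x ≠ m ∧ x ≠ 0 then 1 else 0) := by
      by_cases hx : x = m <;> by_cases h0 : x = 0 <;>
        simp [map0, nz, List.countP_cons, hx, h0]
    have h2 : nz (x :: t) = nz t + (if x ≠ 0 then 1 else 0) := by
      by_cases h0 : x = 0 <;> simp [nz, List.countP_cons, h0]
    rw [h1, h2]
    constructor
    · by_cases hx : x = m <;> by_cases h0 : x = 0 <;> simp [hx, h0] <;> omega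
    · intro hm hm0
      by_cases hx : x = m
      · rw [if_neg (by simp [hx] : ¬(x ≠ m ∧ x ≠ 0)),
            if_pos (show x ≠ 0 from by rw [hx]; exact hm0)]
        omega
      · have hmt : m ∈ t := by
          rcases List.mem_cons.1 hm with h | h
          · exact absurd h.symm hx
          · exact h
        have hst := ih2 hmt hm0
        by_cases h0 : x = 0 <;> simp [hx, h0] <;> omega

theorem first_zero_split (l : List Int) (h : (0:Int) ∈ l) :
    ∃ a b, l = a ++ 0 :: b ∧ (0:Int) ∉ a := by
  induction l with
  | nil => simp at h
  | cons x t ih =>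
    by_cases hx : x = 0
    · exact ⟨[], t, by simp [hx], by simp⟩
    · have : (0:Int) ∈ t := by
        rcases List.mem_cons.1 h with h' | h'
        · exact absurd h'.symm hx
        · exact h'
      obtain ⟨a, b, hab, hna⟩ := ih this
      exact ⟨x :: a, b, by simp [hab], by simp [hna, Ne.symm hx]⟩

-- B is additive across a zero separator
theorem B_split (u v : List Int) :
    minOperations_alt (u ++ 0 :: v) = minOperations_alt u + minOperations_alt v := by
  unfold minOperations_alt
  exact foldB_split u v [] 0

theorem B_nil : minOperations_alt [] = 0 := rfl

theorem nz_append_zero (u v : List Int) : nz (u ++ 0 :: v) = nz u + nz v := by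
  simp [nz, List.countP_append, List.countP_cons]

-- ---- the round lemma ----
theorem round_lemma (nums : List Int) :
    minOperations_alt nums = (onePassA nums).2 + minOperations_alt (onePassA nums).1 ∧
    nz (onePassA nums).1 ≤ nz nums ∧
    (nums.any (· ≠ 0) → nz (onePassA nums).1 < nz nums) := by
  generalize hlen : nums.length = n
  induction n using Nat.strong_induction_on generalizing nums with
  | _ n ih =>
  by_cases hz : (0:Int) ∈ nums
  · obtain ⟨a, b, rfl, hna⟩ := first_zero_split nums hz
    have h0 : ∀ x ∈ a, x ≠ 0 := fun x hx h => hna (h ▸ hx)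
    have hlb : b.length < n := by
      rw [← hlen]; simp; omega
    obtain ⟨IH1, IH2, IH3⟩ := ih b.length hlb b rfl
    rw [onePassA_split a b h0]
    simp only
    refine ⟨?_, ?_, ?_⟩
    · rw [B_split a b, B_split (map0 (a.min?.getD 0) a) (onePassA b).1]
      by_cases ha : a = []
      · subst ha
        simp only [map0, List.map_nil, reduceIte, B_nil]
        omega
      · rw [if_neg ha, B_seg a ha h0]
        omega
    · rw [nz_append_zero, nz_append_zero]
      have := (nz_map0 (a.min?.getD 0) a).1
      omega
    · intro hany
      rw [nz_append_zero, nz_append_zero]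
      rcases (by simpa [List.any_eq_true] using hany :
          (∃ x ∈ a, x ≠ 0) ∨ (0:Int) ≠ 0 ∨ ∃ x ∈ b, x ≠ 0) with h | h | h
      · obtain ⟨x, hx, _⟩ := h
        have ha : a ≠ [] := by rintro rfl; simp at hx
        obtain ⟨hmem, _⟩ := min_facts ha
        have := (nz_map0 (a.min?.getD 0) a).2 hmem (h0 _ hmem)
        omega
      · exact absurd h (by simp)
      · have := IH3 (by simpa [List.any_eq_true] using h)
        have h1 := (nz_map0 (a.min?.getD 0) a).1
        omega
  · have h0 : ∀ x ∈ nums, x ≠ 0 := fun x hx h => hz (h ▸ hx)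
    rw [onePassA_zero_free nums h0]
    by_cases ha : nums = []
    · subst ha
      simp [map0, B_nil, nz]
    · rw [if_neg ha]
      simp only
      obtain ⟨hmem, _⟩ := min_facts ha
      have hstrict := (nz_map0 (nums.min?.getD 0) nums).2 hmem (h0 _ hmem)
      refine ⟨?_, by omega, fun _ => hstrict⟩
      rw [B_seg nums ha h0]

theorem goA_eq (fuel : Nat) : ∀ (nums : List Int) (c : Int), nz nums < fuel →
    goA fuel nums c = c + minOperations_alt nums := by
  induction fuel with
  | zero => intro nums c h; exact absurd h (Nat.not_lt_zero _)
  | succ f ih =>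
    intro nums c h
    simp only [goA]
    by_cases hany : nums.any (· ≠ 0)
    · rw [if_pos hany]
      obtain ⟨heq, hle, hlt⟩ := round_lemma nums
      have hlt' := hlt hany
      rw [ih (onePassA nums).1 (c + (onePassA nums).2) (by omega)]
      rw [heq]
      ring
    · rw [if_neg hany]
      have hall : ∀ x ∈ nums, x = 0 := by
        intro x hx
        by_contra hxx
        exact hany (List.any_eq_true.2 ⟨x, hx, by simpa using hxx⟩)
      have hB : minOperations_alt nums = 0 := foldB_zeros nums [] 0 hall
      omega

-- ===== VERDICT (by name: the statement is the Claim_ definition above) =====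
theorem minOperations_spec : Claim_equal_minOperations := by
  intro nums _
  unfold Spec_minOperations minOperations
  rw [show (nums.countP (· ≠ 0) + 1) = nz nums + 1 from rfl, goA_eq _ _ _ (Nat.lt_succ_self _)]
  simp
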